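-- pv_equiv track=rewrite | github.com/nlothian/autocoder | autocoder_utils/gh_pr_helper.py | _summarize_ci_log
-- ===== SOURCE A (Python) =====
-- def _summarize_ci_log(log_output: str, include_full_log: bool) -> str:
--     """
--     Return either the full CI log or a snippet focused on the failure summary.
--     """
--     if include_full_log or not log_output:
--         return log_output
--
--     lines = log_output.strip().splitlines()
--     if not lines:
--         return ""
--
--     start_idx: int | None = None
--     for idx, line in enumerate(lines):
--         if "short test summary info" in line.lower():
--             start_idx = idx
--             break
--
--     if start_idx is None:
--         for idx, line in enumerate(lines):
--             if "failed" in line.lower():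
--                 start_idx = idx
--                 break
--
--     if start_idx is None:
--         start_idx = max(len(lines) - 40, 0)
--
--     snippet = "\n".join(lines[start_idx:]).strip()
--     return snippet
-- ===== SOURCE B (Python) =====
-- def _summarize_ci_log(log_output: str, include_full_log: bool) -> str:
--     if include_full_log or not log_output:
--         return log_output
--
--     lines = log_output.strip().splitlines()
--     if not lines:
--         return ""
--
--     # Search the whole joined, lowercased text once per marker and recover the
--     # line index by counting the newlines before the match position.
--     low = "\n".join(lines).lower()
--     pos = low.find("short test summary info")
--     if pos < 0:
--         pos = low.find("failed")
--     if pos >= 0: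
--         start_idx = low.count("\n", 0, pos)
--     else:
--         start_idx = max(len(lines) - 40, 0)
--
--     return "\n".join(lines[start_idx:]).strip()
-- ===== Notes on version B (the rewrite author's own statement) =====
-- stated objective: alternative
-- what changed: Instead of scanning line by line, B lowercases the joined text once and runs a whole-text substring search (str.find) for each marker, then recovers the start line as the number of newlines before the match position (str.count on the prefix); the per-line enumeration loops disappear.
import Mathlib
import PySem

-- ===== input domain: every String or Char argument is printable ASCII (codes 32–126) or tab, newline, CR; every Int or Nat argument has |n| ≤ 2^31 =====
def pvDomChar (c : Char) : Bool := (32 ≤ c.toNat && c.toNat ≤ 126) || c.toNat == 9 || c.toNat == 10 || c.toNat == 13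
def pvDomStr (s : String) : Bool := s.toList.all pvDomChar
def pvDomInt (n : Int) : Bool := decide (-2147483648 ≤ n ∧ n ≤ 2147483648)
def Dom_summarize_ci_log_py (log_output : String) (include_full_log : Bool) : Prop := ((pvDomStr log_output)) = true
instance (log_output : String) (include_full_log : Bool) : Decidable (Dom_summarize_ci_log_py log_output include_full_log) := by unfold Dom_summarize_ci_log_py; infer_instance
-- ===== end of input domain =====

-- B replaces A's per-line first-hit scans by one whole-text substring search over the
-- lowercased joined log, recovering the start line as the newline count before the match
-- position (alternative algorithm, same exact return value).

-- ===== PORT A =====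
-- A's 'for idx, line in enumerate(lines): if sub in line.lower(): start_idx = idx; break'
def pvFindSub (sub : String) : List (Int × String) → Option Int
  | [] => none
  | p :: rest =>
      if PySem.Str.isIn sub (PySem.Str.lower p.2) then some p.1 else pvFindSub sub rest

def summarize_ci_log_py (log_output : String) (include_full_log : Bool) : String :=
  if include_full_log || log_output == "" then log_output
  else
    let lines := PySem.Str.splitlines (PySem.Str.strip log_output)
    if lines = [] then ""
    else
      let start1 := pvFindSub "short test summary info" (PySem.List.enumerate lines 0)
      let start2 := match start1 with
        | some i => some i
        | none => pvFindSub "failed" (PySem.List.enumerate lines 0)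
      let start_idx : Int := match start2 with
        | some i => i
        | none => max ((lines.length : Int) - 40) 0
      PySem.Str.strip (PySem.Str.join "\n" (PySem.List.slice lines (some start_idx) none))


-- ===== PORT B =====
def summarize_ci_log_py_alt (log_output : String) (include_full_log : Bool) : String :=
  if include_full_log || log_output == "" then log_output
  else
    let lines := PySem.Str.splitlines (PySem.Str.strip log_output)
    if lines = [] then ""
    else
      let low := PySem.Str.lower (PySem.Str.join "\n" lines)
      let pos0 := PySem.Str.find low "short test summary info"
      let pos := if pos0 < 0 then PySem.Str.find low "failed" else pos0
      let start_idx : Int :=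
        if 0 ≤ pos then
          (PySem.Str.count (PySem.Str.slice low none (some pos)) "\n" : Int)
        else max ((lines.length : Int) - 40) 0
      PySem.Str.strip (PySem.Str.join "\n" (PySem.List.slice lines (some start_idx) none))


-- ===== PRECONDITION & SPEC =====
def Spec_summarize_ci_log_py (log_output : String) (include_full_log : Bool) (out : String) : Prop := out = summarize_ci_log_py_alt log_output include_full_log
instance (log_output : String) (include_full_log : Bool) (out : String) : Decidable (Spec_summarize_ci_log_py log_output include_full_log out) := by unfold Spec_summarize_ci_log_py; infer_instance

-- ===== CLAIM (what is proved, stated in full; the proofs are below) =====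
def Claim_equal_summarize_ci_log_py : Prop := ∀ (log_output : String) (include_full_log : Bool), Dom_summarize_ci_log_py log_output include_full_log → Spec_summarize_ci_log_py log_output include_full_log (summarize_ci_log_py log_output include_full_log)

-- ===== LEMMAS AND PROOFS =====

theorem pvJoin_single (sep l) : PySem.Chars.join sep [l] = l := by
  simp [PySem.Chars.join, List.intercalate]
theorem pvJoin_cons (sep l x xs) :
    PySem.Chars.join sep (l :: x :: xs) = l ++ sep ++ PySem.Chars.join sep (x :: xs) := by
  simp [PySem.Chars.join, List.intercalate, List.intersperse]

theorem pvLowerChar_ne_newline {c : Char} (h : c ≠ '\n') : PySem.Chars.lowerChar c ≠ '\n' := by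
  unfold PySem.Chars.lowerChar
  split_ifs with hu
  · intro heq
    have h2 : PySem.Chars.isupper c = true := hu
    simp only [PySem.Chars.isupper, Bool.and_eq_true, decide_eq_true_eq, Char.le_def,
      UInt32.le_iff_toNat_le] at h2
    have hA : ('A').val.toNat = 65 := rfl
    have hZ : ('Z').val.toNat = 90 := rfl
    have h1 : (Char.ofNat (c.toNat + 32)).toNat = 10 := by rw [heq]; rfl
    rw [Char.toNat_ofNat] at h1
    have hval : (c.toNat + 32).isValidChar := Or.inl (by simp only [Char.toNat] at *; omega)
    rw [if_pos hval] at h1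
    simp only [Char.toNat] at *
    omega
  · exact h

theorem pvNewline_notMem_lower {l : List Char} (h : '\n' ∉ l) :
    '\n' ∉ PySem.Chars.lower l := by
  simp only [PySem.Chars.lower, List.mem_map]
  rintro ⟨c, hc, heq⟩
  exact pvLowerChar_ne_newline (fun hcn => h (hcn ▸ hc)) heq

theorem pvLower_join (lls : List (List Char)) :
    PySem.Chars.lower (PySem.Chars.join ['\n'] lls)
      = PySem.Chars.join ['\n'] (lls.map PySem.Chars.lower) := by
  induction lls with
  | nil => rfl
  | cons l rest ih =>
      cases rest with
      | nil => simp [pvJoin_single, PySem.Chars.lower]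
      | cons x xs =>
          rw [pvJoin_cons]
          simp only [List.map_cons, pvJoin_cons]
          simp only [PySem.Chars.lower] at ih ⊢
          rw [List.map_append, List.map_append, ih]
          simp [show List.map PySem.Chars.lowerChar ['\n'] = ['\n'] from by decide,
            PySem.Chars.lower]

theorem pvCount_go_single (c : Char) :
    ∀ (s : List Char) (fuel acc : Nat), s.length ≤ fuel →
      PySem.Chars.count.go [c] fuel s acc = acc + s.count c := by
  intro s
  induction s with
  | nil => intro fuel acc _; rw [PySem.Chars.count.go.eq_def]; cases fuel <;> simp
  | cons h t ih =>
      intro fuel acc hf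
      cases fuel with
      | zero => simp at hf
      | succ f =>
          rw [PySem.Chars.count.go.eq_3]
          simp only [List.length_cons] at hf
          by_cases hc : c = h
          · rw [if_pos (by simp [List.isPrefixOf, hc])]
            have : List.drop [c].length (h :: t) = t := by simp
            rw [this, ih f (acc + 1) (by omega)]
            simp [List.count_cons, hc]
            omega
          · rw [if_neg (by simp [List.isPrefixOf, hc])]
            rw [ih f acc (by omega)]
            simp [List.count_cons, hc]
            exact fun hh => hc hh.symm

theorem pvCount_single (s : List Char) (c : Char) :
    PySem.Chars.count s [c] = s.count c := by
  rw [PySem.Chars.count]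
  simp [pvCount_go_single c s s.length 0 le_rfl]

theorem pvPrefix_sep {pat w t : List Char} (hnl : '\n' ∉ pat) :
    pat <+: (w ++ '\n' :: t) ↔ pat <+: w := by
  constructor
  · intro hp
    by_cases hle : pat.length ≤ w.length
    · have heq : pat = (w ++ '\n' :: t).take pat.length := List.prefix_iff_eq_take.mp hp
      rw [List.take_append_of_le_length hle] at heq
      exact heq ▸ List.take_prefix _ _
    · exfalso
      have hlt : w.length < pat.length := by omega
      have hlen : w.length < (w ++ '\n' :: t).length := by simp
      have h1 : pat[w.length]'(hlt) = (w ++ '\n' :: t)[w.length]'(hlen) :=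
        hp.getElem hlt
      have h2 : (w ++ '\n' :: t)[w.length]'(hlen) = '\n' := by
        rw [List.getElem_append_right le_rfl]
        simp
      apply hnl
      have : pat[w.length]'(hlt) = '\n' := by rw [h1, h2]
      exact this ▸ List.getElem_mem hlt
  · exact fun hp => hp.trans (List.prefix_append w ('\n' :: t))

theorem pvFind_eq {s pat : List Char} {f : Nat}
    (hocc : pat <+: s.drop f) (hmin : ∀ i < f, ¬ pat <+: s.drop i) :
    PySem.Chars.find s pat = (f : Int) := by
  have hinfix : pat <:+: s := hocc.isInfix.trans (s.drop_suffix f).isInfix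
  have hF : 0 ≤ PySem.Chars.find s pat := (PySem.Chars.find_nonneg_iff s pat).mpr hinfix
  obtain ⟨h1, h2⟩ := PySem.Chars.find_spec hF
  have hle1 : f ≤ (PySem.Chars.find s pat).toNat := by
    by_contra hlt
    exact hmin _ (by omega) h1
  have hle2 : (PySem.Chars.find s pat).toNat ≤ f := by
    by_contra hlt
    exact h2 f (by omega) hocc
  omega

theorem pvPushMem {cur : List Char} {acc : List (List Char)}
    (hacc : ∀ l ∈ acc, '\n' ∉ l) (hcur : '\n' ∉ cur) :
    ∀ l ∈ (cur.reverse :: acc), '\n' ∉ l := by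
  intro l hl
  rcases List.mem_cons.mp hl with rfl | hl
  · simpa using hcur
  · exact hacc l hl

theorem pvGo_no_nl (isB : Char → Bool) (hB10 : isB '\n' = true) :
    ∀ (n : Nat) (s cur acc : _), s.length ≤ n → (∀ l ∈ acc, '\n' ∉ l) → ('\n' ∉ cur) →
      ∀ l ∈ PySem.Chars.splitlines.go isB s cur acc, '\n' ∉ l := by
  intro n
  induction n with
  | zero =>
      intro s cur acc hs hacc hcur
      have hsnil : s = [] := by cases s <;> simp_all
      subst hsnil
      rw [PySem.Chars.splitlines.go.eq_def]
      split
      · split_ifs with h <;> intro l hl <;> rw [List.mem_reverse] at hl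
        · exact hacc l hl
        · exact pvPushMem hacc hcur l hl
      · simp_all
      · simp_all
  | succ n ih =>
      intro s cur acc hs hacc hcur
      rw [PySem.Chars.splitlines.go.eq_def]
      split
      · split_ifs with h <;> intro l hl <;> rw [List.mem_reverse] at hl
        · exact hacc l hl
        · exact pvPushMem hacc hcur l hl
      · intro l hl
        refine ih _ _ _ ?_ (pvPushMem hacc hcur) (by simp) l hl
        simp at hs; omega
      · split_ifs with hB
        · intro l hl
          refine ih _ _ _ ?_ (pvPushMem hacc hcur) (by simp) l hl
          simp at hs; omega
        · intro l hl
          refine ih _ _ _ ?_ hacc ?_ l hl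
          · simp at hs; omega
          · intro hmem
            rcases List.mem_cons.mp hmem with hcn | hmem
            · exact hB (hcn ▸ hB10)
            · exact hcur hmem

theorem pvSplitlines_no_newline (s : List Char) :
    ∀ l ∈ PySem.Chars.splitlines s, '\n' ∉ l := by
  unfold PySem.Chars.splitlines
  exact pvGo_no_nl _ (by decide) s.length s [] [] le_rfl (by simp) (by simp)


def pvFirstHit (pat : List Char) : List (List Char) → Option Nat
  | [] => none
  | l :: rest =>
      if PySem.Chars.isIn pat l then some 0 else (pvFirstHit pat rest).map (· + 1)

theorem pvInfix_of_prefix_drop {pat s : List Char} {j : Nat} (h : pat <+: s.drop j) :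
    pat <:+: s := h.isInfix.trans (s.drop_suffix j).isInfix

theorem pvMain (pat : List Char) (hne : pat ≠ []) (hnl : '\n' ∉ pat) :
    ∀ lls : List (List Char), (∀ l ∈ lls, '\n' ∉ l) →
      (pvFirstHit pat lls = none → PySem.Chars.find (PySem.Chars.join ['\n'] lls) pat = -1) ∧
      (∀ n, pvFirstHit pat lls = some n →
        0 ≤ PySem.Chars.find (PySem.Chars.join ['\n'] lls) pat ∧
        ((List.take (PySem.Chars.find (PySem.Chars.join ['\n'] lls) pat).toNat
            (PySem.Chars.join ['\n'] lls)).count '\n') = n) := by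
  intro lls
  induction lls with
  | nil =>
      intro _
      constructor
      · intro _
        rw [PySem.Chars.find_eq_neg_one_iff]
        intro hinf
        exact hne (List.infix_nil.mp hinf)
      · intro n hn; simp [pvFirstHit] at hn
  | cons l rest ih =>
      intro hno
      have hl : '\n' ∉ l := hno l (by simp)
      have hrest : ∀ x ∈ rest, '\n' ∉ x := fun x hx => hno x (List.mem_cons_of_mem _ hx)
      cases rest with
      | nil =>
          rw [pvJoin_single]
          constructor
          · intro hfH
            simp only [pvFirstHit] at hfH
            split_ifs at hfH with hin
            rw [PySem.Chars.find_eq_neg_one_iff]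
            exact (PySem.Chars.isIn_eq_false_iff pat l).mp (by simpa using hin)
          · intro n hn
            simp only [pvFirstHit] at hn
            split_ifs at hn with hin
            · cases hn
              have hF : 0 ≤ PySem.Chars.find l pat :=
                (PySem.Chars.find_nonneg_iff l pat).mpr ((PySem.Chars.isIn_iff_infix pat l).mp hin)
              refine ⟨hF, ?_⟩
              exact List.count_eq_zero.mpr (fun hmem => hl (List.mem_of_mem_take hmem))
            · simp at hn
      | cons r rs =>
          rw [pvJoin_cons]
          rw [show l ++ ['\n'] ++ PySem.Chars.join ['\n'] (r :: rs)
                = l ++ '\n' :: PySem.Chars.join ['\n'] (r :: rs) from by simp]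
          set T := PySem.Chars.join ['\n'] (r :: rs) with hT
          obtain ⟨ih1, ih2⟩ := ih hrest
          by_cases hin : PySem.Chars.isIn pat l
          · -- found in the first line
            have hF0 : 0 ≤ PySem.Chars.find l pat :=
              (PySem.Chars.find_nonneg_iff l pat).mpr ((PySem.Chars.isIn_iff_infix pat l).mp hin)
            obtain ⟨hocc, hmin⟩ := PySem.Chars.find_spec hF0
            have hFlle : (PySem.Chars.find l pat).toNat ≤ l.length := by
              have := PySem.Chars.find_le_length l pat; omega
            have hfind : PySem.Chars.find (l ++ '\n' :: T) pat
                = ((PySem.Chars.find l pat).toNat : Int) := by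
              apply pvFind_eq
              · rw [List.drop_append_of_le_length hFlle]
                exact (pvPrefix_sep hnl).mpr hocc
              · intro i hi
                rw [List.drop_append_of_le_length (by omega)]
                intro hp
                exact hmin i hi ((pvPrefix_sep hnl).mp hp)
            constructor
            · intro hfH; simp [pvFirstHit, hin] at hfH
            · intro n hn
              simp only [pvFirstHit, if_pos hin] at hn
              cases hn
              refine ⟨by rw [hfind]; omega, ?_⟩
              rw [hfind, Int.toNat_natCast, List.take_append_of_le_length hFlle]
              exact List.count_eq_zero.mpr (fun hmem => hl (List.mem_of_mem_take hmem))
          · -- not in the first line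
            have hnotin : ∀ j, ¬ pat <+: l.drop j := by
              intro j hp
              exact ((PySem.Chars.isIn_eq_false_iff pat l).mp (by simpa using hin))
                (pvInfix_of_prefix_drop hp)
            constructor
            · intro hfH
              simp only [pvFirstHit, if_neg hin, Option.map_eq_none_iff] at hfH
              have hTfind := ih1 hfH
              rw [PySem.Chars.find_eq_neg_one_iff]
              intro hinf
              obtain ⟨j, hj⟩ := (PySem.Chars.exists_prefix_drop_iff_isIn pat _).mpr
                ((PySem.Chars.isIn_iff_infix pat _).mpr hinf)
              rcases le_or_gt j l.length with hle | hgt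
              · rw [List.drop_append_of_le_length hle] at hj
                exact hnotin j ((pvPrefix_sep hnl).mp hj)
              · rw [List.drop_append, List.drop_eq_nil_of_le (le_of_lt hgt)] at hj
                simp only [List.nil_append] at hj
                rw [show j - l.length = (j - l.length - 1) + 1 from by omega,
                  List.drop_succ_cons] at hj
                rw [PySem.Chars.find_eq_neg_one_iff] at hTfind
                exact hTfind (pvInfix_of_prefix_drop hj)
            · intro n hn
              simp only [pvFirstHit, if_neg hin, Option.map_eq_some_iff] at hn
              obtain ⟨m, hm, rfl⟩ := hn
              obtain ⟨hFt0, hcount⟩ := ih2 m hm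
              obtain ⟨hoccT, hminT⟩ := PySem.Chars.find_spec hFt0
              have hfind : PySem.Chars.find (l ++ '\n' :: T) pat
                  = ((l.length + 1 + (PySem.Chars.find T pat).toNat : Nat) : Int) := by
                apply pvFind_eq
                · rw [List.drop_append, List.drop_eq_nil_of_le (by omega)]
                  rw [show l.length + 1 + (PySem.Chars.find T pat).toNat - l.length
                        = (PySem.Chars.find T pat).toNat + 1 from by omega]
                  rw [List.drop_succ_cons]
                  simpa using hoccT
                · intro i hi hp
                  rcases le_or_gt i l.length with hle | hgt
                  · rw [List.drop_append_of_le_length hle] at hp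
                    exact hnotin i ((pvPrefix_sep hnl).mp hp)
                  · rw [List.drop_append, List.drop_eq_nil_of_le (le_of_lt hgt)] at hp
                    have hi' : i - l.length = (i - l.length - 1) + 1 := by omega
                    rw [hi', List.drop_succ_cons] at hp
                    simp at hp
                    exact hminT (i - l.length - 1) (by omega) hp
              refine ⟨by rw [hfind]; omega, ?_⟩
              rw [hfind, Int.toNat_natCast]
              rw [List.take_append, List.take_of_length_le (by omega)]
              rw [show l.length + 1 + (PySem.Chars.find T pat).toNat - l.length
                    = (PySem.Chars.find T pat).toNat + 1 from by omega]
              rw [List.take_succ_cons]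
              rw [List.count_append, List.count_cons]
              have hcl : l.count '\n' = 0 := List.count_eq_zero.mpr hl
              simp [hcl, hcount]


theorem pvFindSub_eq_firstHit (pat : String) (lines : List String) (k : Int) :
    pvFindSub pat (PySem.List.enumerate lines k)
      = (pvFirstHit pat.toList (lines.map (fun l => PySem.Chars.lower l.toList))).map
          (fun n => k + n) := by
  induction lines generalizing k with
  | nil => rfl
  | cons l rest ih =>
      simp only [PySem.List.enumerate_cons, pvFindSub, pvFirstHit, List.map_cons]
      by_cases h : PySem.Chars.isIn pat.toList (PySem.Chars.lower l.toList)
      · simp [PySem.Str.isIn_eq, PySem.Str.toList_lower, h]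
      · simp only [PySem.Str.isIn_eq, PySem.Str.toList_lower, h, if_false, ih (k + 1)]
        cases pvFirstHit pat.toList (rest.map (fun l => PySem.Chars.lower l.toList)) <;>
          simp <;> ring_nf

theorem pvLowList (lines : List String) :
    (PySem.Str.lower (PySem.Str.join "\n" lines)).toList
      = PySem.Chars.join ['\n'] (lines.map (fun l => PySem.Chars.lower l.toList)) := by
  rw [PySem.Str.toList_lower, PySem.Str.toList_join,
    show ("\n" : String).toList = ['\n'] from rfl, pvLower_join, List.map_map]
  rfl

theorem pvNoNlLow {lines : List String} (hln : ∀ l ∈ lines, '\n' ∉ l.toList) :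
    ∀ x ∈ lines.map (fun l => PySem.Chars.lower l.toList), '\n' ∉ x := by
  intro x hx
  obtain ⟨l, hl, rfl⟩ := List.mem_map.mp hx
  exact pvNewline_notMem_lower (hln l hl)

theorem pvKey_none {lines : List String} (pat : String) (hne : pat.toList ≠ [])
    (hnl : '\n' ∉ pat.toList) (hln : ∀ l ∈ lines, '\n' ∉ l.toList)
    (h : pvFindSub pat (PySem.List.enumerate lines 0) = none) :
    PySem.Str.find (PySem.Str.lower (PySem.Str.join "\n" lines)) pat = -1 := by
  rw [pvFindSub_eq_firstHit] at h
  rw [PySem.Str.find_eq, pvLowList]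
  cases hfh : pvFirstHit pat.toList (lines.map (fun l => PySem.Chars.lower l.toList)) with
  | none => exact (pvMain pat.toList hne hnl _ (pvNoNlLow hln)).1 hfh
  | some n => rw [hfh] at h; simp at h

theorem pvKey_some {lines : List String} (pat : String) (hne : pat.toList ≠ [])
    (hnl : '\n' ∉ pat.toList) (hln : ∀ l ∈ lines, '\n' ∉ l.toList) {i : Int}
    (h : pvFindSub pat (PySem.List.enumerate lines 0) = some i) :
    0 ≤ PySem.Str.find (PySem.Str.lower (PySem.Str.join "\n" lines)) pat ∧
    (PySem.Str.count (PySem.Str.slice (PySem.Str.lower (PySem.Str.join "\n" lines)) none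
        (some (PySem.Str.find (PySem.Str.lower (PySem.Str.join "\n" lines)) pat))) "\n" : Int)
      = i := by
  rw [pvFindSub_eq_firstHit] at h
  cases hfh : pvFirstHit pat.toList (lines.map (fun l => PySem.Chars.lower l.toList)) with
  | none => rw [hfh] at h; simp [Option.map] at h
  | some n =>
      rw [hfh] at h
      replace h : (0 : Int) + (n : Int) = i := Option.some.inj h
      obtain ⟨hpos, hcnt⟩ := (pvMain pat.toList hne hnl _ (pvNoNlLow hln)).2 n hfh
      rw [PySem.Str.find_eq, pvLowList]
      refine ⟨hpos, ?_⟩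
      rw [PySem.Str.count_eq, PySem.Str.toList_slice,
        show ("\n" : String).toList = ['\n'] from rfl,
        PySem.Chars.slice_eq_listSlice, pvLowList,
        PySem.List.slice_to _ hpos, pvCount_single, hcnt]
      omega


theorem pvPorts_eq (log_output : String) (include_full_log : Bool) :
    summarize_ci_log_py log_output include_full_log
      = summarize_ci_log_py_alt log_output include_full_log := by
  unfold summarize_ci_log_py summarize_ci_log_py_alt
  by_cases h1 : (include_full_log || log_output == "") = true
  · rw [if_pos h1, if_pos h1]
  · rw [if_neg h1, if_neg h1]
    set L := PySem.Str.splitlines (PySem.Str.strip log_output) with hL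
    by_cases h2 : L = []
    · rw [if_pos h2, if_pos h2]
    · rw [if_neg h2, if_neg h2]
      dsimp only
      have hln : ∀ l ∈ L, '\n' ∉ l.toList := by
        intro l hl hmem
        have hml : l.toList ∈ L.map String.toList := List.mem_map_of_mem hl
        rw [hL, PySem.Str.splitlines_map_toList] at hml
        exact pvSplitlines_no_newline _ _ hml hmem
      rcases hS : pvFindSub "short test summary info" (PySem.List.enumerate L 0) with _ | i
      · have hfS := pvKey_none (lines := L) "short test summary info" (by decide) (by decide) hln hS
        rw [hfS]
        rcases hF : pvFindSub "failed" (PySem.List.enumerate L 0) with _ | j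
        · have hfF := pvKey_none (lines := L) "failed" (by decide) (by decide) hln hF
          rw [hfF, if_pos (show (-1 : Int) < 0 from by norm_num),
            if_neg (show ¬ (0 : Int) ≤ -1 from by norm_num)]
        · obtain ⟨hpos, hcnt⟩ := pvKey_some (lines := L) "failed" (by decide) (by decide) hln hF
          rw [if_pos (show (-1 : Int) < 0 from by norm_num), if_pos hpos, hcnt]
      · obtain ⟨hpos, hcnt⟩ := pvKey_some (lines := L) "short test summary info" (by decide) (by decide) hln hS
        rw [if_neg (show ¬ PySem.Str.find (PySem.Str.lower (PySem.Str.join "\n" L)) "short test summary info" < 0 from by omega),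
          if_pos hpos, hcnt]

-- ===== VERDICT (by name: the statement is the Claim_ definition above) =====
theorem summarize_ci_log_py_spec : Claim_equal_summarize_ci_log_py := by
  intro log_output include_full_log _
  unfold Spec_summarize_ci_log_py
  exact pvPorts_eq log_output include_full_log
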